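-- pv_equiv track=rewrite | github.com/luabida/udacity_cs212 | lesson_1/card_ranks.py | card_ranks
-- ===== SOURCE A (Python) =====
-- def card_ranks(cards):
--     "Return a list of the ranks, sorted with higher first."
--     ranks = [r for r,s in cards]
--     figures = {'A': 14, 'K': 13, 'Q': 12, 'J': 11, 'T': 10}
--     a = []
--     for rank in ranks:
--         if rank in figures:
--             a.append(figures[rank])
--         else:
--             a.append(int(rank))
--     a.sort(reverse=True)
--     return a
-- ===== SOURCE B (Python) =====
-- def card_ranks(cards):
--     "Return a list of the ranks, sorted with higher first."
--     figures = {'A': 14, 'K': 13, 'Q': 12, 'J': 11, 'T': 10}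
--     result = []
--     for r, s in cards:
--         v = figures[r] if r in figures else int(r)
--         # insert v into the descending-sorted result (online insertion sort)
--         i = 0
--         while i < len(result) and result[i] > v:
--             i += 1
--         result.insert(i, v)
--     return result
-- ===== Notes on version B (the rewrite author's own statement) =====
-- stated objective: alternative
-- what changed: Instead of mapping all ranks to a list and then calling .sort(reverse=True), B makes one pass over the cards and inserts each mapped value directly into its place in a descending-sorted result list (online insertion sort, no intermediate list and no library sort).
import Mathlib
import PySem

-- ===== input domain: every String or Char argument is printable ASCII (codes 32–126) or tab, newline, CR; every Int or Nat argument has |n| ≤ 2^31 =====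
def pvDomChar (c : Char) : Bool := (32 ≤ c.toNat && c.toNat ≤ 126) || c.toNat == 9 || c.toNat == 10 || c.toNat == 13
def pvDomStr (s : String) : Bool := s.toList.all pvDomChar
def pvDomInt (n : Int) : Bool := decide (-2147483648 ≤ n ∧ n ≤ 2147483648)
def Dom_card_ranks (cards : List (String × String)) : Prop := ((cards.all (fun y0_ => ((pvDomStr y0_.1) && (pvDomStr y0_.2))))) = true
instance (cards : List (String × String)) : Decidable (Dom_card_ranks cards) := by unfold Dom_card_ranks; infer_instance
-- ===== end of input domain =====

-- B replaces "map then list.sort(reverse=True)" by a single pass that inserts each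
-- mapped rank into its place in a descending-sorted result (online insertion sort).


-- ===== PORT A =====
def card_ranks (cards : List (String × String)) : List Int :=
  let ranks := cards.map (fun p => p.1)
  let figures : PySem.Dict String Int :=
    PySem.Dict.ofList [("A", 14), ("K", 13), ("Q", 12), ("J", 11), ("T", 10)]
  let a := ranks.foldl (fun a rank =>
      if figures.contains rank then a ++ [figures.getD rank 0]
      else a ++ [(PySem.Int.ofStr? rank).getD 0]) []   -- int(rank); none = ValueError, excluded by Pre_
  PySem.List.sorted a (fun x => x) true

-- ===== PORT B =====
def pvRankVal (rank : String) : Int :=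
  let figures : PySem.Dict String Int :=
    PySem.Dict.ofList [("A", 14), ("K", 13), ("Q", 12), ("J", 11), ("T", 10)]
  if figures.contains rank then figures.getD rank 0
  else (PySem.Int.ofStr? rank).getD 0   -- int(r); none = ValueError, excluded by Pre_

-- Source B's while-loop + insert: walk past the entries still greater than v, put v there
def pvInsertDesc (v : Int) : List Int → List Int
  | [] => [v]
  | x :: xs => if x > v then x :: pvInsertDesc v xs else v :: x :: xs

def card_ranks_alt (cards : List (String × String)) : List Int :=
  cards.foldl (fun result p => pvInsertDesc (pvRankVal p.1) result) []

-- ===== PRECONDITION & SPEC =====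
-- Pre_ excludes exactly the inputs where A raises ValueError: a rank that is neither a
-- figure letter nor an int(...)-parsable string.
def Pre_card_ranks (cards : List (String × String)) : Prop :=
  ∀ p ∈ cards, p.1 ∈ (["A", "K", "Q", "J", "T"] : List String) ∨ (PySem.Int.ofStr? p.1).isSome = true
instance (cards : List (String × String)) : Decidable (Pre_card_ranks cards) := by
  unfold Pre_card_ranks; infer_instance
def pvWitness_card_ranks : (List (String × String)) := [("A", "s"), ("7", "h"), ("7", "d"), ("T", "c")]

def Spec_card_ranks (cards : List (String × String)) (out : List Int) : Prop := out = card_ranks_alt cards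
instance (cards : List (String × String)) (out : List Int) : Decidable (Spec_card_ranks cards out) := by unfold Spec_card_ranks; infer_instance

-- ===== CLAIM (what is proved, stated in full; the proofs are below) =====
def Claim_equal_card_ranks : Prop := ∀ (cards : List (String × String)), Dom_card_ranks cards → Pre_card_ranks cards → Spec_card_ranks cards (card_ranks cards)

-- ===== LEMMAS AND PROOFS =====

theorem pvInsertDesc_perm (v : Int) (l : List Int) : (pvInsertDesc v l).Perm (v :: l) := by
  induction l with
  | nil => simp [pvInsertDesc]
  | cons x xs ih =>
    simp only [pvInsertDesc]
    split
    · exact ((ih.cons x).trans (List.Perm.swap v x xs))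
    · exact List.Perm.refl _

theorem pvInsertDesc_pairwise (v : Int) (l : List Int)
    (h : l.Pairwise (fun a b => b ≤ a)) :
    (pvInsertDesc v l).Pairwise (fun a b => b ≤ a) := by
  induction l with
  | nil => simp [pvInsertDesc]
  | cons x xs ih =>
    simp only [pvInsertDesc]
    rcases List.pairwise_cons.mp h with ⟨hx, hxs⟩
    split
    · rename_i hgt
      refine List.pairwise_cons.mpr ⟨?_, ih hxs⟩
      intro y hy
      rcases List.mem_cons.mp ((pvInsertDesc_perm v xs).mem_iff.mp hy) with rfl | hy
      · omega
      · exact hx y hy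
    · rename_i hle
      refine List.pairwise_cons.mpr ⟨?_, h⟩
      intro y hy
      rcases List.mem_cons.mp hy with rfl | hy
      · omega
      · exact le_trans (hx y hy) (by omega)

theorem pvFold_perm (cards : List (String × String)) (l : List Int) :
    (cards.foldl (fun result p => pvInsertDesc (pvRankVal p.1) result) l).Perm
      (l ++ cards.map (fun p => pvRankVal p.1)) := by
  induction cards generalizing l with
  | nil => simp
  | cons c cs ih =>
    simp only [List.foldl_cons, List.map_cons]
    refine (ih _).trans ?_
    have h1 : (pvInsertDesc (pvRankVal c.1) l ++ cs.map (fun p => pvRankVal p.1)).Perm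
        (pvRankVal c.1 :: (l ++ cs.map (fun p => pvRankVal p.1))) :=
      (pvInsertDesc_perm _ _).append_right _
    exact h1.trans List.perm_middle.symm

theorem pvFold_pairwise (cards : List (String × String)) (l : List Int)
    (h : l.Pairwise (fun a b => b ≤ a)) :
    (cards.foldl (fun result p => pvInsertDesc (pvRankVal p.1) result) l).Pairwise
      (fun a b => b ≤ a) := by
  induction cards generalizing l with
  | nil => exact h
  | cons c cs ih => exact ih _ (pvInsertDesc_pairwise _ _ h)

theorem card_ranks_eq_sorted (cards : List (String × String)) :
    card_ranks cards = PySem.List.sorted (cards.map (fun p => pvRankVal p.1)) (fun x => x) true := by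
  have hfun : (fun (a : List Int) rank =>
      if (PySem.Dict.ofList [("A", (14:Int)), ("K", 13), ("Q", 12), ("J", 11), ("T", 10)]).contains rank = true
      then a ++ [(PySem.Dict.ofList [("A", (14:Int)), ("K", 13), ("Q", 12), ("J", 11), ("T", 10)]).getD rank 0]
      else a ++ [(PySem.Int.ofStr? rank).getD 0]) = (fun a rank => a ++ [pvRankVal rank]) := by
    funext a r
    by_cases h : (PySem.Dict.ofList [("A", (14:Int)), ("K", 13), ("Q", 12), ("J", 11), ("T", 10)]).contains r = true <;>
      simp [pvRankVal, h]
  simp only [card_ranks]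
  rw [hfun, PySem.List.foldl_append_singleton_eq_map, List.map_map]
  rfl

-- ===== VERDICT (by name: the statement is the Claim_ definition above) =====
theorem card_ranks_spec : Claim_equal_card_ranks := by
  intro cards _ _
  unfold Spec_card_ranks
  rw [card_ranks_eq_sorted]
  set vals := cards.map (fun p => pvRankVal p.1) with hv
  have hpermA : (PySem.List.sorted vals (fun x => x) true).Perm vals := PySem.List.sorted_perm _ _ _
  have hpermB : (card_ranks_alt cards).Perm vals := by
    unfold card_ranks_alt
    simpa using pvFold_perm cards []
  have hpA : (PySem.List.sorted vals (fun x => x) true).Pairwise (fun a b => b ≤ a) := by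
    simpa using PySem.List.sorted_pairwise_rev vals (fun x => x)
  have hpB : (card_ranks_alt cards).Pairwise (fun a b => b ≤ a) := by
    unfold card_ranks_alt
    exact pvFold_pairwise cards [] (by simp)
  exact PySem.List.eq_of_perm_of_pairwise_le_of_injective (fun x : Int => -x)
    neg_injective (hpermA.trans hpermB.symm)
    (hpA.imp (fun h => Int.neg_le_neg h)) (hpB.imp (fun h => Int.neg_le_neg h))
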